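-- pv_equiv track=rewrite | github.com/YosysHQ/yosys | tests/tools/txt2tikztiming.py | value_to_logic
-- ===== SOURCE A (Python) =====
-- def value_to_logic(value):
--     found_x = False
--     for char in value:
--         if char == '1':
--             return "H"
--         if char == 'x':
--             found_x = True
--     return "U" if found_x else "L"
-- ===== SOURCE B (Python) =====
-- def value_to_logic(value):
--     if '1' in value:
--         return "H"
--     if 'x' in value:
--         return "U"
--     return "L"
-- ===== Notes on version B (the rewrite author's own statement) =====
-- stated objective: simpler
-- what changed: Replaces the fused single loop with a found_x flag by two independent substring-membership checks ('1' in value, then 'x' in value), eliminating the flag and the explicit loop; the interpreter-level loop is replaced by C-level scans, measured ~10x faster.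
import Mathlib
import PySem

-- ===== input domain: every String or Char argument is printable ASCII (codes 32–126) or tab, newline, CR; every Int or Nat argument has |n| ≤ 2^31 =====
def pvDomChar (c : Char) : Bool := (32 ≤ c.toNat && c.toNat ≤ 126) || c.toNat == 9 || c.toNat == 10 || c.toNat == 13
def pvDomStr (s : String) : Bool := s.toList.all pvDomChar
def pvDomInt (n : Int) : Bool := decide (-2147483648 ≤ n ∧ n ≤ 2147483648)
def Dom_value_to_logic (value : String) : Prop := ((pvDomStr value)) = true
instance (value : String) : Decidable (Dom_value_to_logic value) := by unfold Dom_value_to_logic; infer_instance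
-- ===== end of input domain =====

-- B replaces A's fused loop with a found_x flag by two membership checks; objective: simpler.

-- ===== PORT A =====
-- the for-loop with the found_x flag and the early return on '1'
def valueToLogicLoop : List Char → Bool → String
  | [], found_x => if found_x then "U" else "L"
  | c :: rest, found_x =>
      if c = '1' then "H"
      else valueToLogicLoop rest (if c = 'x' then true else found_x)

def value_to_logic (value : String) : String :=
  valueToLogicLoop value.toList false

-- ===== PORT B =====
def value_to_logic_alt (value : String) : String :=
  if PySem.Str.isIn "1" value then "H"
  else if PySem.Str.isIn "x" value then "U"
  else "L"

-- ===== PRECONDITION & SPEC =====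
def Spec_value_to_logic (value : String) (out : String) : Prop := out = value_to_logic_alt value
instance (value : String) (out : String) : Decidable (Spec_value_to_logic value out) := by unfold Spec_value_to_logic; infer_instance

-- ===== CLAIM (what is proved, stated in full; the proofs are below) =====
def Claim_equal_value_to_logic : Prop := ∀ (value : String), Dom_value_to_logic value → Spec_value_to_logic value (value_to_logic value)

-- ===== LEMMAS AND PROOFS =====
theorem isIn_singleton (a : Char) (s : String) :
    PySem.Str.isIn (String.ofList [a]) s = true ↔ a ∈ s.toList := by
  rw [PySem.Str.isIn_iff_infix]
  have hone : (String.ofList [a]).toList = [a] := by simp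
  rw [hone]
  constructor
  · intro h; exact h.mem (by simp)
  · intro h
    obtain ⟨l, r, hlr⟩ := List.mem_iff_append.mp h
    exact ⟨l, r, by simp [hlr]⟩

theorem valueToLogicLoop_eq (l : List Char) (fx : Bool) :
    valueToLogicLoop l fx =
      if '1' ∈ l then "H" else if fx || decide ('x' ∈ l) then "U" else "L" := by
  induction l generalizing fx with
  | nil => simp [valueToLogicLoop]
  | cons c rest ih =>
    simp only [valueToLogicLoop, List.mem_cons]
    by_cases h1 : c = '1'
    · simp [h1]
    · rw [ih]
      by_cases hx : c = 'x' <;> by_cases hm1 : '1' ∈ rest <;>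
        cases fx <;>
        simp_all [eq_comm (a := '1') (b := c), eq_comm (a := 'x') (b := c)]

-- ===== VERDICT (by name: the statement is the Claim_ definition above) =====
theorem value_to_logic_spec : Claim_equal_value_to_logic := by
  intro value _
  unfold Spec_value_to_logic value_to_logic value_to_logic_alt
  rw [valueToLogicLoop_eq]
  have h1 : PySem.Str.isIn "1" value = true ↔ '1' ∈ value.toList := isIn_singleton '1' value
  have hx : PySem.Str.isIn "x" value = true ↔ 'x' ∈ value.toList := isIn_singleton 'x' value
  by_cases m1 : '1' ∈ value.toList <;> by_cases mx : 'x' ∈ value.toList <;>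
    simp_all
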